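-- pv_equiv track=rewrite | github.com/Rohit10701/DSA_python | Codeforces/800-1000/Div3_Dic.py | dice
-- ===== SOURCE A (Python) =====
-- def dice(n,s,r):
--     missing_num = s-r
--     rest_sum = r
--     ls=[]
--     rem_num=n-1
--     i=0
--     while i<n:
--         if rem_num == 0:
--             break
--         rem = r//rem_num
--         ls.append(rem)
--         r = r-rem
--         rem_num-=1
--         i+=1
--
--     ls.append(missing_num)
--     return ls
-- ===== SOURCE B (Python) =====
-- def dice(n, s, r):
--     if n <= 1:
--         return [s - r]
--     q, rem = divmod(r, n - 1)
--     return [q] * (n - 1 - rem) + [q + 1] * rem + [s - r]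
-- ===== Notes on version B (the rewrite author's own statement) =====
-- stated objective: simpler
-- what changed: Replaced the mutating while-loop of repeated floor divisions by a closed-form divmod: (n-1-rem) copies of q and rem copies of q+1 built with list multiplication, then the missing value appended.
import Mathlib
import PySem

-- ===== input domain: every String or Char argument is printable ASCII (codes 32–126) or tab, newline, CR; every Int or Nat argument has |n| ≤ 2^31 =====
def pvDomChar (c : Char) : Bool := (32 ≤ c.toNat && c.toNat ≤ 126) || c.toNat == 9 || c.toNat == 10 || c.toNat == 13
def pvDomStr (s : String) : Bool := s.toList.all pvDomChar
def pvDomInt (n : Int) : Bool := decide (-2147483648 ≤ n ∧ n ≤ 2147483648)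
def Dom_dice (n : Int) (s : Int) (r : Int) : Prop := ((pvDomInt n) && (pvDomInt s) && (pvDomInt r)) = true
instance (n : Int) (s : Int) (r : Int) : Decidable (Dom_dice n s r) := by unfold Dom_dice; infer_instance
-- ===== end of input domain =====

-- B replaces A's repeated-floor-division while loop by one divmod closed form (simpler).

-- ===== PORT A =====
-- the while loop: state (i, rem_num, r, ls); breaks when rem_num == 0, stops when i ≥ n
def diceLoop (n : Int) (i : Int) (remNum : Int) (r : Int) (ls : List Int) : List Int :=
  if i < n then
    if remNum == 0 then ls
    else
      let rem := PySem.Int.floordiv r remNum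
      diceLoop n (i + 1) (remNum - 1) (r - rem) (ls ++ [rem])
  else ls
termination_by (n - i).toNat
decreasing_by omega

def dice (n : Int) (s : Int) (r : Int) : List Int :=
  let missingNum := s - r
  diceLoop n 0 (n - 1) r [] ++ [missingNum]

-- ===== PORT B =====
def dice_alt (n : Int) (s : Int) (r : Int) : List Int :=
  if n ≤ 1 then [s - r]
  else
    let q := PySem.Int.floordiv r (n - 1)
    let rem := PySem.Int.mod r (n - 1)
    List.replicate (n - 1 - rem).toNat q ++ List.replicate rem.toNat (q + 1) ++ [s - r]

-- ===== PRECONDITION & SPEC =====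
def Spec_dice (n : Int) (s : Int) (r : Int) (out : List Int) : Prop := out = dice_alt n s r
instance (n : Int) (s : Int) (r : Int) (out : List Int) : Decidable (Spec_dice n s r out) := by unfold Spec_dice; infer_instance

-- ===== CLAIM (what is proved, stated in full; the proofs are below) =====
def Claim_equal_dice : Prop := ∀ (n : Int) (s : Int) (r : Int), Dom_dice n s r → Spec_dice n s r (dice n s r)

-- ===== LEMMAS AND PROOFS =====

theorem diceLoop_zero (n i r : Int) (ls : List Int) : diceLoop n i 0 r ls = ls := by
  unfold diceLoop; split <;> simp

-- the loop with divisor m+1 produces the divmod distribution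
theorem diceLoop_closed (m : Nat) : ∀ (v n i : Int) (acc : List Int), i + ((m : Int) + 1) = n - 1 →
    diceLoop n i ((m : Int) + 1) v acc =
      acc ++ List.replicate (((m : Int) + 1 - v % ((m : Int) + 1)).toNat) (v / ((m : Int) + 1))
          ++ List.replicate ((v % ((m : Int) + 1)).toNat) (v / ((m : Int) + 1) + 1) := by
  induction m with
  | zero =>
    intro v n i acc h
    push_cast at h ⊢
    unfold diceLoop
    rw [if_pos (by omega), if_neg (by simp),
      show (1:Int) - 1 = 0 by norm_num, diceLoop_zero,
      PySem.Int.floordiv_eq_ediv_of_pos (show (0:Int) < 1 by norm_num)]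
    simp
  | succ k ih =>
    intro v n i acc h
    push_cast at h ⊢
    unfold diceLoop
    rw [if_pos (by omega), if_neg (by simp; omega)]
    simp only [PySem.Int.floordiv_eq_ediv_of_pos (show (0:Int) < (k:Int)+1+1 by positivity)]
    rw [show (k:Int) + 1 + 1 - 1 = (k:Int) + 1 by ring,
      ih (v - v / ((k:Int) + 1 + 1)) n (i + 1) _ (by omega)]
    have hv0 : ((k:Int)+1+1) * (v / ((k:Int)+1+1)) + v % ((k:Int)+1+1) = v :=
      Int.mul_ediv_add_emod v _
    have hs0 : 0 ≤ v % ((k:Int)+1+1) := Int.emod_nonneg v (by omega)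
    have hs1 : v % ((k:Int)+1+1) < (k:Int)+1+1 := Int.emod_lt_of_pos v (by positivity)
    have hv' : v - v / ((k:Int)+1+1) = v % ((k:Int)+1+1) + ((k:Int)+1) * (v / ((k:Int)+1+1)) := by
      linear_combination -hv0
    by_cases hcase : v % ((k:Int)+1+1) = (k:Int) + 1
    · -- remainder at its max: it rolls over, the sub-quotient becomes q+1
      have hq' : (v - v / ((k:Int)+1+1)) / ((k:Int)+1) = v / ((k:Int)+1+1) + 1 := by
        rw [hv', hcase,
          show ((k:Int)+1) + ((k:Int)+1) * (v / ((k:Int)+1+1)) = ((k:Int)+1) * (v / ((k:Int)+1+1) + 1) by ring,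
          Int.mul_ediv_cancel_left _ (by omega : ((k:Int)+1) ≠ 0)]
      have hm' : (v - v / ((k:Int)+1+1)) % ((k:Int)+1) = 0 := by
        rw [hv', hcase,
          show ((k:Int)+1) + ((k:Int)+1) * (v / ((k:Int)+1+1)) = ((k:Int)+1) * (v / ((k:Int)+1+1) + 1) by ring]
        exact Int.mul_emod_right _ _
      rw [hq', hm', hcase,
        show ((k:Int) + 1 + 1 - ((k:Int) + 1)).toNat = 1 by omega,
        show ((k:Int) + 1 - 0).toNat = k + 1 by omega,
        show ((k:Int) + 1).toNat = k + 1 by omega,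
        show ((0:Int)).toNat = 0 from rfl]
      simp [List.append_assoc]
    · have hq' : (v - v / ((k:Int)+1+1)) / ((k:Int)+1) = v / ((k:Int)+1+1) := by
        rw [hv', Int.add_mul_ediv_left _ _ (by omega : ((k:Int)+1) ≠ 0),
          Int.ediv_eq_zero_of_lt hs0 (by omega), zero_add]
      have hm' : (v - v / ((k:Int)+1+1)) % ((k:Int)+1) = v % ((k:Int)+1+1) := by
        rw [hv', Int.add_mul_emod_self_left, Int.emod_eq_of_lt hs0 (by omega)]
      rw [hq', hm',
        show ((k:Int) + 1 + 1 - v % ((k:Int)+1+1)).toNat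
           = ((k:Int) + 1 - v % ((k:Int)+1+1)).toNat + 1 by omega]
      simp [List.replicate_succ, List.append_assoc]

-- ===== VERDICT (by name: the statement is the Claim_ definition above) =====
theorem dice_spec : Claim_equal_dice := by
  intro n s r _
  unfold Spec_dice dice dice_alt
  by_cases hn : n ≤ 1
  · rw [if_pos hn]
    rcases lt_or_eq_of_le hn with h | h
    · unfold diceLoop; rw [if_neg (by omega)]; simp
    · subst h; rw [show (1:Int) - 1 = 0 from rfl, diceLoop_zero]; simp
  · rw [if_neg hn]
    obtain ⟨m, hm⟩ : ∃ m : Nat, n - 1 = (m : Int) + 1 := ⟨(n - 2).toNat, by omega⟩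
    rw [hm, diceLoop_closed m r n 0 [] (by omega),
      PySem.Int.mod_eq_emod_of_pos (show (0:Int) < (m:Int) + 1 by positivity),
      PySem.Int.floordiv_eq_ediv_of_pos (show (0:Int) < (m:Int) + 1 by positivity)]
    simp [List.append_assoc]
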